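-- pv_equiv track=rewrite | github.com/mrgransky/ImACCESS | misc/multi_label_annotation.py | assign_semantic_categories
-- ===== SOURCE A (Python) =====
-- SEMANTIC_CATEGORIES = {
-- 	'military': ['military', 'army', 'navy', 'air force', 'soldier', 'officer', 'troop', 'regiment', 'division', 'corps', 'battalion', 'brigade'],
-- 	'political': ['government', 'parliament', 'president', 'prime minister', 'minister', 'official', 'politician', 'leader'],
-- 	'event': ['war', 'battle', 'attack', 'invasion', 'liberation', 'occupation', 'revolution', 'protest', 'march', 'ceremony'],
-- 	'location': ['city', 'town', 'village', 'country', 'region', 'territory', 'front', 'border', 'base', 'camp'],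
-- 	'vehicle': ['tank', 'aircraft', 'plane', 'ship', 'submarine', 'boat', 'truck', 'car', 'jeep', 'vehicle'],
-- 	'weapon': ['gun', 'rifle', 'cannon', 'artillery', 'weapon', 'bomb', 'missile', 'ammunition'],
-- }
--
-- def assign_semantic_categories(labels):
-- 	"""Categorize labels into semantic groups"""
-- 	categorized_labels = []
-- 	for label in labels:
-- 		for category, terms in SEMANTIC_CATEGORIES.items():
-- 			if any(term in label for term in terms):
-- 				if label not in categorized_labels:
-- 					categorized_labels.append(label)
-- 				break
-- 	return categorized_labels
-- ===== SOURCE B (Python) =====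
-- SEMANTIC_CATEGORIES = {
-- 	'military': ['military', 'army', 'navy', 'air force', 'soldier', 'officer', 'troop', 'regiment', 'division', 'corps', 'battalion', 'brigade'],
-- 	'political': ['government', 'parliament', 'president', 'prime minister', 'minister', 'official', 'politician', 'leader'],
-- 	'event': ['war', 'battle', 'attack', 'invasion', 'liberation', 'occupation', 'revolution', 'protest', 'march', 'ceremony'],
-- 	'location': ['city', 'town', 'village', 'country', 'region', 'territory', 'front', 'border', 'base', 'camp'],
-- 	'vehicle': ['tank', 'aircraft', 'plane', 'ship', 'submarine', 'boat', 'truck', 'car', 'jeep', 'vehicle'],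
-- 	'weapon': ['gun', 'rifle', 'cannon', 'artillery', 'weapon', 'bomb', 'missile', 'ammunition'],
-- }
--
-- ALL_TERMS = [t for terms in SEMANTIC_CATEGORIES.values() for t in terms]
--
-- # first-character dispatch table: term lists indexed by their first character
-- TERMS_BY_FIRST = {}
-- for t in ALL_TERMS:
-- 	TERMS_BY_FIRST.setdefault(t[0], []).append(t)
--
-- def _matches(label):
-- 	# positional scan: at each position, try only the terms starting with that character
-- 	# (label.startswith(t, i) == label[i:].startswith(t) for 0 <= i)
-- 	return any(label.startswith(t, i)
-- 	           for i in range(len(label))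
-- 	           for t in TERMS_BY_FIRST.get(label[i], ()))
--
-- def assign_semantic_categories(labels):
-- 	"""Categorize labels into semantic groups"""
-- 	# staged: filter the matching labels, then ordered first-occurrence dedup
-- 	return list(dict.fromkeys(l for l in labels if _matches(l)))
-- ===== Notes on version B (the rewrite author's own statement) =====
-- stated objective: alternative
-- what changed: B is staged instead of interleaved: it prebuilds a first-character dispatch table of the flattened terms, filters labels by a positional scan (at each position, try only the terms starting with that character, via startswith at an offset) instead of A's nested per-category 'term in label' loops with break, and then deduplicates in one separate dict.fromkeys pass instead of A's in-loop 'label not in result' list scan.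
import Mathlib
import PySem

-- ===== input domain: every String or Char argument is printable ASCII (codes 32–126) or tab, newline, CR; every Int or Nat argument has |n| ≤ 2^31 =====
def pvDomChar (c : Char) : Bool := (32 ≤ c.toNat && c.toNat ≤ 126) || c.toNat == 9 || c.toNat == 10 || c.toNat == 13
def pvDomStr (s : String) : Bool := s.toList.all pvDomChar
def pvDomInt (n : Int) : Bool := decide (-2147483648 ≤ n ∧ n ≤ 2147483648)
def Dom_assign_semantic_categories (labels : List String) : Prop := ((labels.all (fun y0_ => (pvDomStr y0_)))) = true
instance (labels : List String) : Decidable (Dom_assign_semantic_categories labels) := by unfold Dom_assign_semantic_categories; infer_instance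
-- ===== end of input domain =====

-- B stages the work instead of interleaving it: a filter pass matching labels by a positional
-- suffix/startswith scan, followed by an ordered dedup pass (dict.fromkeys), replacing A's
-- nested per-category 'term in label' loops with break and in-loop list-membership dedup
-- (objective: alternative; same result).

-- ===== PORT A =====
-- the module constant SEMANTIC_CATEGORIES (dict of category -> term list), in insertion order
def SEMANTIC_CATEGORIES : List (String × List String) :=
  [("military", ["military", "army", "navy", "air force", "soldier", "officer", "troop", "regiment", "division", "corps", "battalion", "brigade"]),
   ("political", ["government", "parliament", "president", "prime minister", "minister", "official", "politician", "leader"]),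
   ("event", ["war", "battle", "attack", "invasion", "liberation", "occupation", "revolution", "protest", "march", "ceremony"]),
   ("location", ["city", "town", "village", "country", "region", "territory", "front", "border", "base", "camp"]),
   ("vehicle", ["tank", "aircraft", "plane", "ship", "submarine", "boat", "truck", "car", "jeep", "vehicle"]),
   ("weapon", ["gun", "rifle", "cannon", "artillery", "weapon", "bomb", "missile", "ammunition"])]

-- inner 'for category, terms in SEMANTIC_CATEGORIES.items(): … break' loop of A
def pvInnerA (label : String) (acc : List String) : List (String × List String) → List String
  | [] => acc
  | (_, terms) :: rest =>
    if terms.any (fun term => PySem.Str.isIn term label) then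
      (if acc.contains label then acc else acc ++ [label])
    else pvInnerA label acc rest

def assign_semantic_categories (labels : List String) : List String :=
  labels.foldl (fun acc label => pvInnerA label acc SEMANTIC_CATEGORIES) []

-- ===== PORT B =====
-- ALL_TERMS = [t for terms in SEMANTIC_CATEGORIES.values() for t in terms]
def ALL_TERMS : List String := (SEMANTIC_CATEGORIES.map (fun ct => ct.2)).flatten

-- first-character dispatch table: for t in ALL_TERMS: TERMS_BY_FIRST.setdefault(t[0], []).append(t)
-- t[0] is ported as t.toList.headD ' ' — every term in ALL_TERMS is a nonempty literal, so the
-- default is never used and this is exactly Python's t[0]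
def TERMS_BY_FIRST : PySem.Dict Char (List String) :=
  ALL_TERMS.foldl (fun d t => d.modify (t.toList.headD ' ') [] (· ++ [t])) PySem.Dict.empty

-- _matches: any(label.startswith(t, i) for i in range(len(label)) for t in TERMS_BY_FIRST.get(label[i], ()))
-- label[i] is ported via pyGet? with default ' ': i is always in range here, so the default is never
-- used; label.startswith(t, i) is exactly label[i:].startswith(t) for 0 <= i, ported as such
def pvMatchesB (label : String) : Bool :=
  (PySem.List.pyRange 0 (PySem.Str.len label) 1).any (fun i =>
    (TERMS_BY_FIRST.getD ((PySem.Str.pyGet? label i).getD ' ') []).any (fun t =>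
      PySem.Str.startswith (PySem.Str.slice label (some i) none) t))

-- list(dict.fromkeys(l for l in labels if _matches(l)))
def assign_semantic_categories_alt (labels : List String) : List String :=
  PySem.List.dedup (labels.filter pvMatchesB)

-- ===== PRECONDITION & SPEC =====
def Spec_assign_semantic_categories (labels : List String) (out : List String) : Prop := out = assign_semantic_categories_alt labels
instance (labels : List String) (out : List String) : Decidable (Spec_assign_semantic_categories labels out) := by unfold Spec_assign_semantic_categories; infer_instance

-- ===== CLAIM (what is proved, stated in full; the proofs are below) =====
def Claim_equal_assign_semantic_categories : Prop := ∀ (labels : List String), Dom_assign_semantic_categories labels → Spec_assign_semantic_categories labels (assign_semantic_categories labels)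

-- ===== LEMMAS AND PROOFS =====

-- A's inner category loop acts exactly like one match test against all categories at once
theorem pvInnerA_eq (label : String) (acc : List String) (cats : List (String × List String)) :
    pvInnerA label acc cats =
      if cats.any (fun ct => ct.2.any (fun term => PySem.Str.isIn term label)) then
        (if acc.contains label then acc else acc ++ [label])
      else acc := by
  induction cats with
  | nil => simp [pvInnerA]
  | cons c rest ih =>
    obtain ⟨name, terms⟩ := c
    rw [pvInnerA]
    by_cases h : terms.any (fun term => PySem.Str.isIn term label) = true
    · have hall : (((name, terms) :: rest).any
          (fun ct => ct.2.any fun term => PySem.Str.isIn term label)) = true := by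
        rw [List.any_cons]; exact Bool.or_eq_true_iff.mpr (Or.inl h)
      rw [if_pos h, if_pos hall]
    · rw [if_neg h, ih]
      have h' : ((((name, terms)) :: rest).any
          (fun ct => ct.2.any fun term => PySem.Str.isIn term label)) =
          rest.any (fun ct => ct.2.any fun term => PySem.Str.isIn term label) := by
        simp only [List.any_cons, Bool.not_eq_true] at *
        rw [h, Bool.false_or]
      rw [h']

-- the dispatch table's bucket for c holds exactly the terms whose first character is c
theorem pvCands_eq (c : Char) :
    TERMS_BY_FIRST.getD c [] = ALL_TERMS.filter (fun t => t.toList.headD ' ' == c) := by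
  have h : TERMS_BY_FIRST =
      (ALL_TERMS.map (fun t => (t.toList.headD ' ', t))).foldl
        (fun d p => d.modify p.1 [] (· ++ [p.2])) PySem.Dict.empty := by
    rw [List.foldl_map]
    rfl
  rw [h, PySem.Dict.getD_foldl_modify_append]
  simp [List.filter_map, Function.comp_def]

-- every term in the flattened table is a nonempty string
theorem pvTerms_ne : ∀ t ∈ ALL_TERMS, t.toList ≠ [] := by decide

-- B's first-char-dispatched positional scan decides exactly Python's 'term in label' over all terms
theorem pvMatchesB_eq (label : String) :
    pvMatchesB label =
      SEMANTIC_CATEGORIES.any (fun ct => ct.2.any (fun term => PySem.Str.isIn term label)) := by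
  have hflat : SEMANTIC_CATEGORIES.any (fun ct => ct.2.any (fun term => PySem.Str.isIn term label))
      = ALL_TERMS.any (fun t => PySem.Str.isIn t label) := by
    simp [ALL_TERMS, List.any_flatten, List.any_map]
    rfl
  rw [hflat, Bool.eq_iff_iff]
  unfold pvMatchesB
  simp only [List.any_eq_true]
  constructor
  · rintro ⟨i, hi, t, ht', hst⟩
    rw [pvCands_eq, List.mem_filter] at ht'
    refine ⟨t, ht'.1, ?_⟩
    have h0 : (0 : Int) ≤ i := (PySem.List.mem_pyRange_one.mp hi).1
    rw [PySem.Str.startswith_eq, PySem.Chars.startswith_iff, PySem.Str.toList_slice,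
        PySem.Chars.slice_eq_listSlice, PySem.List.slice_from _ h0] at hst
    exact (PySem.Str.isIn_iff_infix t label).mpr
      ((PySem.Chars.isIn_iff_infix _ _).mp
        ((PySem.Chars.exists_prefix_drop_iff_isIn _ _).mp ⟨i.toNat, hst⟩))
  · rintro ⟨t, ht, hin⟩
    have hin' : PySem.Chars.isIn t.toList label.toList = true :=
      (PySem.Chars.isIn_iff_infix _ _).mpr ((PySem.Str.isIn_iff_infix _ _).mp hin)
    obtain ⟨j, hj⟩ := (PySem.Chars.exists_prefix_drop_iff_isIn t.toList label.toList).mpr hin'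
    obtain ⟨x, xs, hx⟩ : ∃ x xs, t.toList = x :: xs := by
      cases h : t.toList with
      | nil => exact absurd h (pvTerms_ne t ht)
      | cons a l => exact ⟨a, l, rfl⟩
    obtain ⟨r, hr⟩ := hj
    have hdrop : label.toList.drop j = x :: (xs ++ r) := by
      rw [← hr, hx]; simp
    have hjlt : j < label.toList.length := by
      by_contra h
      push Not at h
      rw [List.drop_eq_nil_of_le h] at hdrop
      exact absurd hdrop (by simp)
    have hget : label.toList[j]? = some x := by
      rw [← List.head?_drop, hdrop, List.head?_cons]
    have hgetS : PySem.Str.pyGet? label ((j : Nat) : Int) = some x := by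
      rw [PySem.Str.pyGet?_natCast]; exact hget
    refine ⟨((j : Nat) : Int), ?_, t, ?_, ?_⟩
    · rw [PySem.List.mem_pyRange_one, PySem.Str.len_eq]
      exact ⟨by positivity, by exact_mod_cast hjlt⟩
    · rw [pvCands_eq, List.mem_filter]
      refine ⟨ht, ?_⟩
      rw [hgetS]
      simp [hx]
    · rw [PySem.Str.startswith_eq, PySem.Chars.startswith_iff, PySem.Str.toList_slice,
          PySem.Chars.slice_eq_listSlice, PySem.List.slice_from _ (by positivity),
          Int.toNat_natCast, hx, hdrop]
      exact ⟨r, by simp⟩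

-- interleaved conditional-dedup fold = filter then Set.add fold (dict.fromkeys)
theorem pv_stage_eq (labels : List String) (acc : List String) :
    labels.foldl (fun acc label => pvInnerA label acc SEMANTIC_CATEGORIES) acc =
      (labels.filter pvMatchesB).foldl PySem.Set.add acc := by
  induction labels generalizing acc with
  | nil => rfl
  | cons label rest ih =>
    rw [List.foldl_cons, List.filter_cons, pvInnerA_eq, ← pvMatchesB_eq]
    by_cases hm : pvMatchesB label = true
    · rw [if_pos hm, if_pos hm, List.foldl_cons, ← ih, PySem.Set.add_eq_ite]
      by_cases hc : label ∈ acc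
      · rw [if_pos hc, if_pos (by simpa using hc)]
      · rw [if_neg hc, if_neg (by simpa using hc)]
    · rw [if_neg hm, if_neg hm, ih]

-- ===== VERDICT (by name: the statement is the Claim_ definition above) =====
theorem assign_semantic_categories_spec : Claim_equal_assign_semantic_categories := by
  intro labels _
  unfold Spec_assign_semantic_categories assign_semantic_categories assign_semantic_categories_alt
  rw [PySem.List.dedup_eq_ofList, PySem.Set.ofList_eq_foldl]
  exact pv_stage_eq labels []
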